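-- pv_equiv track=rewrite | github.com/UsmanJafri/Leo | iisy/resource-model.py | proposition_2_num_sram_total
-- ===== SOURCE A (Python) =====
-- def proposition_2_num_sram_total(n, N, k):
-- 	if n == 1:
-- 		return (N * (k - 1))
--
-- 	total = 0
-- 	for n_curr in range(2, n + 1): #[2 to n-1]
-- 		total += (k - 1) ** n_curr
--
-- 	for n_curr in range(2, n):
-- 		total += (k - 1) ** 2
--
-- 	return total + proposition_2_num_sram_total(n - 1, N, k)
-- ===== SOURCE B (Python) =====
-- def proposition_2_num_sram_total(n, N, k):
--     base = k - 1
--     q = base * base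
--     total = N * base
--     p = base  # base ** 1
--     inner = 0  # sum of base**j for j in [2, m]
--     for m in range(2, n + 1):
--         p *= base
--         inner += p
--         total += inner + (m - 2) * q
--     return total
-- ===== Notes on version B (the rewrite author's own statement) =====
-- stated objective: faster
-- what changed: Replaced the recursion over n with its nested range loops recomputing (k-1)**j from scratch by a single O(n) loop that maintains a running power and a running geometric partial sum.
import Mathlib
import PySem

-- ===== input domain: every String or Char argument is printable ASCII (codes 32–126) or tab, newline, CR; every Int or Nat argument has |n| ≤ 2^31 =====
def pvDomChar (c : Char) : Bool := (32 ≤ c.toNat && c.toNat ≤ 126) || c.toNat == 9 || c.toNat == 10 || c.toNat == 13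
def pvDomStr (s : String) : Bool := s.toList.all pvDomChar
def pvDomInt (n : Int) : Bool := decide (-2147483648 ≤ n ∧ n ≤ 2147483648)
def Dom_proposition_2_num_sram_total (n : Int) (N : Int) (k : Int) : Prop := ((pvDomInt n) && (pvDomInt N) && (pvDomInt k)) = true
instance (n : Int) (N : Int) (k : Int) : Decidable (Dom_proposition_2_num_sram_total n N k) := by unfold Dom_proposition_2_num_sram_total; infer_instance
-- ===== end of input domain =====

-- B replaces A's O(n^2)-power recursion with one O(n) loop keeping a running power
-- and running geometric partial sum (objective: faster, asymptotic).


-- ===== PORT A =====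
-- Literal port of A; for n ≤ 0 Python recurses forever (RecursionError), the
-- 'n < 1 → 0' branch is only a totality guard, those inputs are outside Pre_.
def proposition_2_num_sram_total (n : Int) (N : Int) (k : Int) : Int :=
  if n = 1 then N * (k - 1)
  else if n < 1 then 0
  else
    let total := (PySem.List.pyRange 2 (n + 1) 1).foldl
      (fun t c => t + (k - 1) ^ c.toNat) 0
    let total := (PySem.List.pyRange 2 n 1).foldl
      (fun t _ => t + (k - 1) ^ 2) total
    total + proposition_2_num_sram_total (n - 1) N k
termination_by n.toNat
decreasing_by omega

-- ===== PORT B =====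
def proposition_2_num_sram_total_alt (n : Int) (N : Int) (k : Int) : Int :=
  let base := k - 1
  let q := base * base
  let s := (PySem.List.pyRange 2 (n + 1) 1).foldl
    (fun (s : Int × Int × Int) m =>
      let p := s.2.1 * base
      let inner := s.2.2 + p
      (s.1 + inner + (m - 2) * q, p, inner))
    (N * base, base, 0)
  s.1

-- ===== PRECONDITION & SPEC =====
-- Pre_ excludes n ≤ 0, where Python A recurses without a base case and raises RecursionError.
def Pre_proposition_2_num_sram_total (n : Int) (N : Int) (k : Int) : Prop := 1 ≤ n
instance (n : Int) (N : Int) (k : Int) : Decidable (Pre_proposition_2_num_sram_total n N k) := by unfold Pre_proposition_2_num_sram_total; infer_instance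
def pvWitness_proposition_2_num_sram_total : Int × Int × Int := (4, 3, 5)

def Spec_proposition_2_num_sram_total (n : Int) (N : Int) (k : Int) (out : Int) : Prop := out = proposition_2_num_sram_total_alt n N k
instance (n : Int) (N : Int) (k : Int) (out : Int) : Decidable (Spec_proposition_2_num_sram_total n N k out) := by unfold Spec_proposition_2_num_sram_total; infer_instance

-- ===== CLAIM (what is proved, stated in full; the proofs are below) =====
def Claim_equal_proposition_2_num_sram_total : Prop := ∀ (n : Int) (N : Int) (k : Int), Dom_proposition_2_num_sram_total n N k → Pre_proposition_2_num_sram_total n N k → Spec_proposition_2_num_sram_total n N k (proposition_2_num_sram_total n N k)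


-- ===== LEMMAS AND PROOFS =====

-- powsum b t = b^2 + b^3 + … + b^(t+1)
def powsum (b : Int) : Nat → Int
  | 0 => 0
  | t + 1 => powsum b t + b ^ (t + 2)

-- common closed-form value: f N b t = A (t+1) = B (t+1)
def pvF (N b : Int) : Nat → Int
  | 0 => N * b
  | t + 1 => pvF N b t + powsum b (t + 1) + (t : Int) * (b * b)

theorem powfold (b : Int) : ∀ (t : Nat) (init : Int),
    (PySem.List.pyRange 2 (2 + (t : Int)) 1).foldl (fun a c => a + b ^ c.toNat) init
      = init + powsum b t := by
  intro t
  induction t with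
  | zero => intro init; simp [PySem.List.pyRange_one_eq_nil, powsum]
  | succ t ih =>
    intro init
    have h : (2 : Int) ≤ 2 + (t : Int) := by omega
    have : (2 : Int) + ((t : Nat) + 1 : Nat) = (2 + (t : Int)) + 1 := by push_cast; ring
    rw [this, PySem.List.pyRange_one_succ_right h, List.foldl_append, ih]
    have ht : ((2 : Int) + (t : Int)).toNat = t + 2 := by omega
    simp [powsum, ht]
    ring

theorem constfold (c : Int) : ∀ (l : List Int) (init : Int),
    l.foldl (fun a _ => a + c) init = init + (l.length : Int) * c := by
  intro l
  induction l with
  | nil => intro init; simp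
  | cons x xs ih => intro init; simp [List.foldl, ih]; ring

theorem A_eq (N k : Int) : ∀ (t : Nat),
    proposition_2_num_sram_total ((t : Int) + 1) N k = pvF N (k - 1) t := by
  intro t
  induction t with
  | zero => simp [proposition_2_num_sram_total, pvF]
  | succ t ih =>
    rw [proposition_2_num_sram_total]
    have h1 : ¬ ((t + 1 : Nat) : Int) + 1 = 1 := by omega
    have h2 : ¬ ((t + 1 : Nat) : Int) + 1 < 1 := by omega
    rw [if_neg h1, if_neg h2]
    simp only [constfold, PySem.List.length_pyRange_one]
    have e1 : ((t + 1 : Nat) : Int) + 1 + 1 = 2 + ((t + 1 : Nat) : Int) := by push_cast; ring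
    rw [e1, powfold]
    have e2 : ((t + 1 : Nat) : Int) + 1 - 1 = (t : Int) + 1 := by push_cast; ring
    rw [e2, ih]
    have e3 : (((t + 1 : Nat) : Int) + 1 - 2).toNat = t := by omega
    rw [e3]
    simp [pvF, powsum]
    ring

theorem B_fold (N k : Int) : ∀ (t : Nat),
    (PySem.List.pyRange 2 (2 + (t : Int)) 1).foldl
      (fun (s : Int × Int × Int) m =>
        let p := s.2.1 * (k - 1)
        let inner := s.2.2 + p
        (s.1 + inner + (m - 2) * ((k - 1) * (k - 1)), p, inner))
      (N * (k - 1), k - 1, 0)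
      = (pvF N (k - 1) t, (k - 1) ^ (t + 1), powsum (k - 1) t) := by
  intro t
  induction t with
  | zero => simp [PySem.List.pyRange_one_eq_nil, pvF, powsum]
  | succ t ih =>
    have h : (2 : Int) ≤ 2 + (t : Int) := by omega
    have e : (2 : Int) + ((t : Nat) + 1 : Nat) = (2 + (t : Int)) + 1 := by push_cast; ring
    rw [e, PySem.List.pyRange_one_succ_right h, List.foldl_append, ih]
    simp only [List.foldl, pvF, powsum, Prod.mk.injEq]
    refine ⟨by ring, by ring, by ring⟩

theorem B_eq (N k : Int) (t : Nat) :
    proposition_2_num_sram_total_alt ((t : Int) + 1) N k = pvF N (k - 1) t := by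
  unfold proposition_2_num_sram_total_alt
  have e : ((t : Int) + 1) + 1 = 2 + (t : Int) := by ring
  simp only [e, B_fold]

-- ===== VERDICT (by name: the statement is the Claim_ definition above) =====
theorem proposition_2_num_sram_total_spec : Claim_equal_proposition_2_num_sram_total := by
  intro n N k _ hpre
  unfold Spec_proposition_2_num_sram_total
  have ht : n = ((n - 1).toNat : Int) + 1 := by
    unfold Pre_proposition_2_num_sram_total at hpre; omega
  rw [ht, A_eq, B_eq]
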